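-- pv_equiv track=rewrite | github.com/iwasakishuto/PyVideoEditor | veditor/utils/color_utils.py | generate_color_series
-- ===== SOURCE A (Python) =====
-- def generate_color_series(color, variation, diff=10, reverse=False):
--     """Generate light and dark color series.
--
--     Args:
--         color (tuple)   : Color [0,255]
--         variation (int) : How many colors to create.
--         diff (int)      : How much to change
--         reverse (bool)  : If ``True``, sort in descending order.
--
--     Returns:
--         colors (list) : colors.
--
--     Examples:
--         >>> from pycharmers.utils import generateLightDarks
--         >>> generateLightDarks(color=(245,20,25), variation=3, diff=10)
--         [(235, 10, 15), (245, 20, 25), (255, 30, 35)]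
--         >>> generateLightDarks(color=(245, 20, 25), variation=3, diff=-10)
--         [(225, 0, 5), (235, 10, 15), (245, 20, 25)]
--     """
--     val = max(color[:3]) if diff > 0 else min(color[:3])
--     u = 0
--     for _ in range(variation - 1):
--         val += diff
--         if not 255 >= val >= 0:
--             break
--         u += 1
--     return sorted(
--         [
--             tuple(
--                 [
--                     max(min(e + diff * (u - v), 255), 0) if i < 3 else e
--                     for i, e in enumerate(color)
--                 ]
--             )
--             for v in range(variation)
--         ],
--         reverse=reverse,
--     )
-- ===== SOURCE B (Python) =====
-- def generate_color_series(color, variation, diff=10, reverse=False):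
--     # closed-form step count instead of A's step-by-step loop
--     val = max(color[:3]) if diff > 0 else min(color[:3])
--     if variation <= 1:
--         u = 0
--     elif not (0 <= val + diff <= 255):
--         u = 0
--     elif diff > 0:
--         u = min(variation - 1, (255 - val) // diff)
--     elif diff < 0:
--         u = min(variation - 1, val // (-diff))
--     else:
--         u = variation - 1
--     head, tail = color[:3], color[3:]
--     series = [
--         tuple(min(max(e + diff * (u - v), 0), 255) for e in head) + tuple(tail)
--         for v in range(variation)
--     ]
--     return sorted(series, reverse=reverse)
-- ===== Notes on version B (the rewrite author's own statement) =====
-- stated objective: simpler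
-- what changed: Replaces A's step-by-step loop that counts how many diff-steps keep the extremal channel in [0,255] with a closed-form floor-division formula for that count, and builds each tuple by clamping the first three channels (a slice) and appending the rest instead of an index-tested enumerate comprehension.
import Mathlib
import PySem

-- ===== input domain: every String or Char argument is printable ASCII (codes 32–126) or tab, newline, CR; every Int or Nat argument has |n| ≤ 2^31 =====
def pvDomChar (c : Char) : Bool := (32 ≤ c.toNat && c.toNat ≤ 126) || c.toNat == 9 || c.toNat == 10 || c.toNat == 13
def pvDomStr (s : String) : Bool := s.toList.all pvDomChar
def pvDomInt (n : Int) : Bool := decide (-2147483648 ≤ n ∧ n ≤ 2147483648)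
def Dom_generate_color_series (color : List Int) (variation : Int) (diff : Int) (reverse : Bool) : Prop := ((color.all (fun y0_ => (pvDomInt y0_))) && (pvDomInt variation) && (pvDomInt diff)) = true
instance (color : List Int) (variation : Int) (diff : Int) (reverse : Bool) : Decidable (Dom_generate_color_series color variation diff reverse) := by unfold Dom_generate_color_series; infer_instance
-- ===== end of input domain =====

-- B replaces A's step-counting loop with a closed-form floor-division count (same results; objective: simpler).

-- ===== PORT A =====
-- the step-counting loop: for _ in range(n): val += diff; if not 255 >= val >= 0: break; u += 1
def pvLoopA (diff : Int) : Nat → Int → Int → Int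
  | 0, _, u => u
  | n+1, val, u =>
      let val' := val + diff
      if 255 ≥ val' ∧ val' ≥ 0 then pvLoopA diff n val' (u+1) else u

-- the inner tuple comprehension over enumerate(color)
def pvRowA (color : List Int) (delta : Int) : List Int :=
  (PySem.List.enumerate color 0).map
    (fun ie => if ie.1 < 3 then max (min (ie.2 + delta) 255) 0 else ie.2)

def generate_color_series (color : List Int) (variation : Int) (diff : Int) (reverse : Bool) : List (List Int) :=
  -- max()/min() of an empty slice raises in Python; Pre_ excludes color = [] (getD 0 is junk there)
  let val := if diff > 0 then (PySem.List.max? (PySem.List.slice color none (some 3)) (fun x => x)).getD 0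
             else (PySem.List.min? (PySem.List.slice color none (some 3)) (fun x => x)).getD 0
  let u := pvLoopA diff (variation - 1).toNat val 0
  PySem.List.sorted ((PySem.List.pyRange 0 variation 1).map (fun v => pvRowA color (diff * (u - v)))) (fun x => x) reverse

-- ===== PORT B =====
-- closed-form count of in-range steps
def pvClosedU (val variation diff : Int) : Int :=
  if variation ≤ 1 then 0
  else if ¬(0 ≤ val + diff ∧ val + diff ≤ 255) then 0
  else if 0 < diff then min (variation - 1) (PySem.Int.floordiv (255 - val) diff)
  else if diff < 0 then min (variation - 1) (PySem.Int.floordiv val (-diff))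
  else variation - 1

-- clamp the first three channels, keep the rest
def pvRowB (head tail : List Int) (delta : Int) : List Int :=
  head.map (fun e => min (max (e + delta) 0) 255) ++ tail

def generate_color_series_alt (color : List Int) (variation : Int) (diff : Int) (reverse : Bool) : List (List Int) :=
  let val := if diff > 0 then (PySem.List.max? (PySem.List.slice color none (some 3)) (fun x => x)).getD 0
             else (PySem.List.min? (PySem.List.slice color none (some 3)) (fun x => x)).getD 0
  let u := pvClosedU val variation diff
  let head := PySem.List.slice color none (some 3)
  let tail := PySem.List.slice color (some 3) none
  PySem.List.sorted ((PySem.List.pyRange 0 variation 1).map (fun v => pvRowB head tail (diff * (u - v)))) (fun x => x) reverse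

-- ===== PRECONDITION & SPEC =====
-- Pre_ excludes only color = [], on which Python's max()/min() of the empty slice raises ValueError (both A and B raise there).
def Pre_generate_color_series (color : List Int) (variation : Int) (diff : Int) (reverse : Bool) : Prop := color ≠ []
instance (color : List Int) (variation : Int) (diff : Int) (reverse : Bool) : Decidable (Pre_generate_color_series color variation diff reverse) := by unfold Pre_generate_color_series; infer_instance
def pvWitness_generate_color_series : List Int × Int × Int × Bool := ([245, 20, 25], 3, 10, false)

def Spec_generate_color_series (color : List Int) (variation : Int) (diff : Int) (reverse : Bool) (out : List (List Int)) : Prop := out = generate_color_series_alt color variation diff reverse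
instance (color : List Int) (variation : Int) (diff : Int) (reverse : Bool) (out : List (List Int)) : Decidable (Spec_generate_color_series color variation diff reverse out) := by unfold Spec_generate_color_series; infer_instance

-- ===== CLAIM (what is proved, stated in full; the proofs are below) =====
def Claim_equal_generate_color_series : Prop := ∀ (color : List Int) (variation : Int) (diff : Int) (reverse : Bool), Dom_generate_color_series color variation diff reverse → Pre_generate_color_series color variation diff reverse → Spec_generate_color_series color variation diff reverse (generate_color_series color variation diff reverse)

-- ===== LEMMAS AND PROOFS =====

-- accumulator shift for A's loop
theorem pvLoopA_shift (diff : Int) (n : Nat) : ∀ (val u : Int), pvLoopA diff n val u = u + pvLoopA diff n val 0 := by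
  induction n with
  | zero => intro val u; simp [pvLoopA]
  | succ n ih =>
      intro val u
      simp only [pvLoopA]
      split_ifs with h
      · rw [ih (val + diff) (u + 1), ih (val + diff) (0 + 1)]; ring
      · simp

theorem floordiv_sub_self (a b : Int) (hb : 0 < b) :
    PySem.Int.floordiv (a - b) b = PySem.Int.floordiv a b - 1 := by
  rw [PySem.Int.floordiv_eq_ediv_of_pos hb, PySem.Int.floordiv_eq_ediv_of_pos hb]
  have := Int.add_mul_ediv_right a (-1) (by omega : b ≠ 0)
  have e : a + -1 * b = a - b := by ring
  rw [e] at this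
  omega

-- the closed form computes the loop's count (with n = max(0, variation-1))
theorem pvLoopA_closed (diff : Int) : ∀ (n : Nat) (val : Int),
    pvLoopA diff n val 0 =
      (if (n : Int) = 0 then 0
       else if ¬(0 ≤ val + diff ∧ val + diff ≤ 255) then 0
       else if 0 < diff then min (n : Int) (PySem.Int.floordiv (255 - val) diff)
       else if diff < 0 then min (n : Int) (PySem.Int.floordiv val (-diff))
       else (n : Int)) := by
  intro n
  induction n with
  | zero => intro val; simp [pvLoopA]
  | succ n ih =>
      intro val
      simp only [pvLoopA]
      by_cases hc : 255 ≥ val + diff ∧ val + diff ≥ 0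
      · rw [if_pos hc, pvLoopA_shift, ih (val + diff)]
        have hne : ((n : Int) + 1 ≠ 0) := by positivity
        push_cast
        rw [if_neg hne, if_neg (by omega : ¬¬(0 ≤ val + diff ∧ val + diff ≤ 255))]
        by_cases hd : 0 < diff
        · rw [if_pos hd]
          have h1 : 1 ≤ PySem.Int.floordiv (255 - val) diff :=
            (PySem.Int.le_floordiv_iff_mul_le hd).mpr (by omega)
          by_cases hn : (n : Int) = 0
          · rw [if_pos hn, hn]; omega
          · rw [if_neg hn]
            by_cases h2 : 0 ≤ val + diff + diff ∧ val + diff + diff ≤ 255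
            · rw [if_neg (by omega : ¬¬(0 ≤ val + diff + diff ∧ val + diff + diff ≤ 255)), if_pos hd]
              have : PySem.Int.floordiv (255 - (val + diff)) diff
                   = PySem.Int.floordiv (255 - val) diff - 1 := by
                have := floordiv_sub_self (255 - val) diff hd
                rw [show (255:Int) - (val + diff) = 255 - val - diff by ring]
                exact this
              rw [this]; omega
            · rw [if_pos (by omega : ¬(0 ≤ val + diff + diff ∧ val + diff + diff ≤ 255))]
              have h3 : PySem.Int.floordiv (255 - val) diff < 2 :=
                (PySem.Int.floordiv_lt_iff_lt_mul hd).mpr (by omega)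
              have hn1 : 1 ≤ (n : Int) := by omega
              omega
        · rw [if_neg hd]
          by_cases hd' : diff < 0
          · rw [if_pos hd']
            have hpos : 0 < -diff := by omega
            have h1 : 1 ≤ PySem.Int.floordiv val (-diff) :=
              (PySem.Int.le_floordiv_iff_mul_le hpos).mpr (by omega)
            by_cases hn : (n : Int) = 0
            · rw [if_pos hn, hn]; omega
            · rw [if_neg hn]
              by_cases h2 : 0 ≤ val + diff + diff ∧ val + diff + diff ≤ 255
              · rw [if_neg (by omega : ¬¬(0 ≤ val + diff + diff ∧ val + diff + diff ≤ 255)),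
                    if_neg hd, if_pos hd']
                have : PySem.Int.floordiv (val + diff) (-diff)
                     = PySem.Int.floordiv val (-diff) - 1 := by
                  have := floordiv_sub_self val (-diff) hpos
                  rw [show val + diff = val - -diff by ring]
                  exact this
                rw [this]; omega
              · rw [if_pos (by omega : ¬(0 ≤ val + diff + diff ∧ val + diff + diff ≤ 255))]
                have h3 : PySem.Int.floordiv val (-diff) < 2 :=
                  (PySem.Int.floordiv_lt_iff_lt_mul hpos).mpr (by omega)
                have hn1 : 1 ≤ (n : Int) := by omega
                omega
          · have hz : diff = 0 := by omega
            subst hz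
            rw [if_neg (by omega : ¬(0:Int) < 0), if_neg (by omega : ¬(0:Int) < 0)]
            by_cases hn : (n : Int) = 0
            · rw [if_pos hn]; omega
            · rw [if_neg hn, if_neg (by omega : ¬¬(0 ≤ val + 0 + 0 ∧ val + 0 + 0 ≤ 255))]
              omega
      · rw [if_neg hc]
        push_cast
        rw [if_neg (by positivity : ¬((n : Int) + 1 = 0)),
            if_pos (by omega : ¬(0 ≤ val + diff ∧ val + diff ≤ 255))]

theorem pvU_eq (val variation diff : Int) :
    pvLoopA diff (variation - 1).toNat val 0 = pvClosedU val variation diff := by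
  rw [pvLoopA_closed]
  unfold pvClosedU
  by_cases hv : variation ≤ 1
  · rw [if_pos hv, if_pos (by omega : (((variation - 1).toNat : Int)) = 0)]
  · rw [if_neg hv]
    have hn : (((variation - 1).toNat : Int)) = variation - 1 := by omega
    rw [hn, if_neg (by omega : ¬(variation - 1 = 0))]

-- a suffix of enumerate starting at index ≥ 3 is mapped to itself
theorem pvRowA_tail (delta : Int) : ∀ (rest : List Int) (s : Int), 3 ≤ s →
    (PySem.List.enumerate rest s).map
      (fun ie => if ie.1 < 3 then max (min (ie.2 + delta) 255) 0 else ie.2) = rest := by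
  intro rest
  induction rest with
  | nil => intro s _; simp [PySem.List.enumerate_nil]
  | cons x xs ih =>
      intro s hs
      rw [PySem.List.enumerate_cons]
      simp only [List.map_cons]
      rw [if_neg (by omega : ¬ s < 3), ih (s+1) (by omega)]

-- A's enumerate row equals B's slice row
theorem pvRow_eq (color : List Int) (delta : Int) :
    pvRowA color delta = pvRowB (color.take 3) (color.drop 3) delta := by
  unfold pvRowA pvRowB
  match color with
  | [] => simp [PySem.List.enumerate_nil]
  | [a] =>
      simp [PySem.List.enumerate_nil, PySem.List.enumerate_cons]
      omega
  | [a, b] =>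
      simp [PySem.List.enumerate_nil, PySem.List.enumerate_cons]
      omega
  | a :: b :: c :: rest =>
      simp only [PySem.List.enumerate_cons, List.map_cons, List.take, List.drop]
      norm_num
      rw [pvRowA_tail delta rest 3 (by omega)]
      refine ⟨by omega, by omega, by omega, rfl⟩

-- slices are take/drop
theorem pv_slice_to_3 (xs : List Int) : PySem.List.slice xs none (some 3) = xs.take 3 := by
  rw [PySem.List.slice_to xs (by omega : (0:Int) ≤ 3)]; rfl
theorem pv_slice_from_3 (xs : List Int) : PySem.List.slice xs (some 3) none = xs.drop 3 := by
  rw [PySem.List.slice_from xs (by omega : (0:Int) ≤ 3)]; rfl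

-- ===== VERDICT (by name: the statement is the Claim_ definition above) =====
theorem generate_color_series_spec : Claim_equal_generate_color_series := by
  intro color variation diff reverse _ _
  unfold Spec_generate_color_series generate_color_series generate_color_series_alt
  simp only [pvU_eq, pv_slice_to_3, pv_slice_from_3]
  congr 1
  apply List.map_congr_left
  intro v _
  exact pvRow_eq color _
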